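-- pv_equiv track=rewrite | github.com/zazabap/problem-reductions | docs/paper/verify-reductions/verify_k_satisfiability_disjoint_connecting_paths.py | solve_dcp_brute
-- ===== SOURCE A (Python) =====
-- from collections import defaultdict
--
-- def solve_dcp_brute(num_vertices: int, edges: list[tuple[int, int]],
--                     terminal_pairs: list[tuple[int, int]]) -> list[list[int]] | None:
--     """
--     Brute-force solver for Disjoint Connecting Paths.
--     Returns list of paths (each path is a list of vertices) or None.
--     """
--     adj: dict[int, set[int]] = defaultdict(set)
--     for u, v in edges:
--         adj[u].add(v)
--         adj[v].add(u)
--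
--     def find_paths(pair_idx: int, used: frozenset[int]) -> list[list[int]] | None:
--         if pair_idx == len(terminal_pairs):
--             return []
--         s, t = terminal_pairs[pair_idx]
--         if s in used or t in used:
--             return None
--         stack: list[tuple[int, list[int], frozenset[int]]] = [
--             (s, [s], used | frozenset([s]))
--         ]
--         while stack:
--             curr, path, u2 = stack.pop()
--             if curr == t:
--                 result = find_paths(pair_idx + 1, u2)
--                 if result is not None:
--                     return [path] + result
--                 continue
--             for nbr in sorted(adj[curr]):
--                 if nbr not in u2:
--                     stack.append((nbr, path + [nbr], u2 | frozenset([nbr])))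
--         return None
--
--     return find_paths(0, frozenset())
-- ===== SOURCE B (Python) =====
-- from collections import defaultdict
--
-- def solve_dcp_brute(num_vertices: int, edges: list[tuple[int, int]],
--                     terminal_pairs: list[tuple[int, int]]) -> list[list[int]] | None:
--     """
--     Recursive backtracking solver for Disjoint Connecting Paths.
--     Returns list of paths (each path is a list of vertices) or None.
--     """
--     adj: dict[int, set[int]] = defaultdict(set)
--     for u, v in edges:
--         adj[u].add(v)
--         adj[v].add(u)
--
--     def solve(pairs: list[tuple[int, int]], used: frozenset[int]) -> list[list[int]] | None:
--         if not pairs: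
--             return []
--         (s, t), rest_pairs = pairs[0], pairs[1:]
--         if s in used or t in used:
--             return None
--
--         def dfs(curr: int, path: list[int], blocked: frozenset[int]) -> list[list[int]] | None:
--             if curr == t:
--                 rest = solve(rest_pairs, blocked)
--                 return None if rest is None else [path] + rest
--             for nbr in sorted(adj[curr], reverse=True):
--                 if nbr not in blocked:
--                     found = dfs(nbr, path + [nbr], blocked | frozenset([nbr]))
--                     if found is not None:
--                         return found
--             return None
--
--         return dfs(s, [s], used | frozenset([s]))
--
--     return solve(list(terminal_pairs), frozenset())
-- ===== Notes on version B (the rewrite author's own statement) =====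
-- stated objective: alternative
-- what changed: The explicit-stack while-loop search is replaced by a doubly-recursive backtracker: a dfs helper that, at the target, recurses into the next terminal pair and otherwise tries neighbors in descending sorted order (matching the original's sorted-push/LIFO-pop order), returning the first success.
import Mathlib
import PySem

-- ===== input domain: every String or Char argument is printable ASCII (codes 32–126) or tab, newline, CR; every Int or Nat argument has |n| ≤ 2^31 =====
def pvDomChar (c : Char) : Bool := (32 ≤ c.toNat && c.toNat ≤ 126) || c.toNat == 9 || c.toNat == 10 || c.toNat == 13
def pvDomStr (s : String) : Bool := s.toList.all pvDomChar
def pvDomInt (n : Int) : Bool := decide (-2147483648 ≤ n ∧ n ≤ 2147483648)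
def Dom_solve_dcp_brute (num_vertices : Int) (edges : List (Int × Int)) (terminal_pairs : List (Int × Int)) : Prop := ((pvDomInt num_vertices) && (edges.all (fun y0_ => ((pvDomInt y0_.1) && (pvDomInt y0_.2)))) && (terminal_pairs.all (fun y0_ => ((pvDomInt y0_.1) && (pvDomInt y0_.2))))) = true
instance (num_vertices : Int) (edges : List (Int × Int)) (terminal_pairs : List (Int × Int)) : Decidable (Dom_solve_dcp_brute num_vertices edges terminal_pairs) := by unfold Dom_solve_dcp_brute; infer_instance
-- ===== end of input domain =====

-- B replaces A's explicit-stack while-loop search by a recursive DFS backtracker (same values; objective: alternative decomposition, no speed claim).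

-- ---------- shared context of the two ports ----------
-- Both Pythons build the adjacency dict by the same two lines:
--   adj = defaultdict(set); for u, v in edges: adj[u].add(v); adj[v].add(u)
def pvBuildAdj (edges : List (Int × Int)) : PySem.Dict Int (PySem.Set Int) :=
  edges.foldl (fun adj uv =>
    let adj1 := adj.insert uv.1 (PySem.Set.add (adj.getD uv.1 PySem.Set.empty) uv.2)
    adj1.insert uv.2 (PySem.Set.add (adj1.getD uv.2 PySem.Set.empty) uv.1)) PySem.Dict.empty

def pvVerts (edges : List (Int × Int)) : List Int :=
  PySem.Set.ofList (edges.flatMap (fun uv => [uv.1, uv.2]))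


-- pvAdjOK/pvFree/pvPot/pvStackPot exist only to justify TERMINATION of the two searches
-- (used-sets grow inside the finite vertex set pvVerts); they do not affect the computed values.
def pvFree (V : List Int) (used : PySem.Set Int) : Nat :=
  (V.filter (fun v => !(used.contains v))).length

theorem pvFree_le (V : List Int) (used : PySem.Set Int) : pvFree V used ≤ V.length :=
  List.length_filter_le _ _

theorem pvContains_add (used : PySem.Set Int) (n v : Int) :
    (PySem.Set.add used n).contains v = (used.contains v || v == n) := by
  simp only [PySem.Set.add, PySem.Set.contains]
  split
  · rename_i hc
    simp only [List.contains_eq_mem] at *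
    by_cases hv : v = n <;> simp_all [Bool.beq_eq_decide_eq]
  · simp [List.contains_eq_mem, Bool.beq_eq_decide_eq]

theorem pvFree_add_lt (V : List Int) (used : PySem.Set Int) (n : Int)
    (hn : n ∈ V) (hu : used.contains n = false) :
    pvFree V (PySem.Set.add used n) < pvFree V used := by
  unfold pvFree
  have h1 : V.filter (fun v => !((PySem.Set.add used n).contains v))
      = (V.filter (fun v => !(used.contains v))).filter (fun v => !(v == n)) := by
    rw [List.filter_filter]
    apply List.filter_congr
    intro a _
    simp [pvContains_add, Bool.and_comm, Bool.beq_eq_decide_eq]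
  rw [h1]
  apply List.length_filter_lt_length_iff_exists.mpr
  refine ⟨n, ?_, by simp⟩
  simp only [List.mem_filter]
  refine ⟨hn, ?_⟩
  simp_all [List.contains_eq_mem]

theorem pvFree_add_of_not_mem (V : List Int) (used : PySem.Set Int) (n : Int) (hn : n ∉ V) :
    pvFree V (PySem.Set.add used n) = pvFree V used := by
  unfold pvFree
  congr 1
  apply List.filter_congr
  intro a ha
  have : a ≠ n := fun h => hn (h ▸ ha)
  simp [pvContains_add, this, Bool.beq_eq_decide_eq]

def pvPot (V : List Int) (used : PySem.Set Int) : Nat :=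
  (V.length + 1) ^ pvFree V used

def pvStackPot (V : List Int) (stack : List (Int × List Int × PySem.Set Int)) : Nat :=
  (stack.map (fun e => pvPot V e.2.2)).sum

theorem pvPot_pos (V : List Int) (used : PySem.Set Int) : 0 < pvPot V used :=
  Nat.pow_pos (Nat.succ_pos _)

theorem pvStackPot_cons (V : List Int) (e : Int × List Int × PySem.Set Int)
    (stk : List (Int × List Int × PySem.Set Int)) :
    pvStackPot V (e :: stk) = pvPot V e.2.2 + pvStackPot V stk := by
  simp [pvStackPot]

theorem pvStackPot_append (V : List Int) (xs ys : List (Int × List Int × PySem.Set Int)) :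
    pvStackPot V (xs ++ ys) = pvStackPot V xs + pvStackPot V ys := by
  simp [pvStackPot]

def pvAdjOK (adj : PySem.Dict Int (PySem.Set Int)) (V : List Int) : Prop :=
  V.Nodup ∧ ∀ k : Int,
    (PySem.Dict.getD adj k PySem.Set.empty).Nodup ∧
    (∀ x ∈ PySem.Dict.getD adj k PySem.Set.empty, x ∈ V) ∧
    (k ∉ V → PySem.Dict.getD adj k PySem.Set.empty = [])

theorem pvPushPot_lt (adj : PySem.Dict Int (PySem.Set Int)) (V : List Int) (h : pvAdjOK adj V)
    (curr : Int) (path : List Int) (u2 : PySem.Set Int) :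
    pvStackPot V
      ((((PySem.List.sorted (PySem.Dict.getD adj curr PySem.Set.empty) (fun x => x) false).filter
          (fun n => !(u2.contains n))).map
          (fun n => (n, path ++ [n], PySem.Set.add u2 n))).reverse)
      < pvPot V u2 := by
  set nbrs := PySem.Dict.getD adj curr PySem.Set.empty with hnbrs
  set L := (PySem.List.sorted nbrs (fun x => x) false).filter (fun n => !(u2.contains n)) with hL
  have hsum : pvStackPot V ((L.map (fun n => (n, path ++ [n], PySem.Set.add u2 n))).reverse)
      = (L.map (fun n => pvPot V (PySem.Set.add u2 n))).sum := by
    simp [pvStackPot, List.map_reverse, List.sum_reverse, List.map_map]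
    rfl
  rw [hsum]
  have hLmem : ∀ n ∈ L, n ∈ V ∧ u2.contains n = false := by
    intro n hn
    rw [hL, List.mem_filter, PySem.List.mem_sorted] at hn
    exact ⟨(h.2 curr).2.1 n hn.1, by simpa using hn.2⟩
  by_cases hL0 : L = []
  · simpa [hL0] using pvPot_pos V u2
  · obtain ⟨m, hmL⟩ := List.exists_mem_of_ne_nil L hL0
    have hm := hLmem m hmL
    have hf1 : 1 ≤ pvFree V u2 := by
      have : m ∈ V.filter (fun v => !(u2.contains v)) := by
        rw [List.mem_filter]
        exact ⟨hm.1, by simp_all [List.contains_eq_mem]⟩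
      have := List.length_pos_of_mem this
      unfold pvFree; omega
    have hbound : ∀ x ∈ L.map (fun n => pvPot V (PySem.Set.add u2 n)),
        x ≤ (V.length + 1) ^ (pvFree V u2 - 1) := by
      intro x hx
      rw [List.mem_map] at hx
      obtain ⟨n, hn, rfl⟩ := hx
      have h2 := hLmem n hn
      have hlt := pvFree_add_lt V u2 n h2.1 h2.2
      exact Nat.pow_le_pow_right (Nat.succ_le_succ (Nat.zero_le _)) (by omega)
    have hsum_le : (L.map (fun n => pvPot V (PySem.Set.add u2 n))).sum
        ≤ L.length * (V.length + 1) ^ (pvFree V u2 - 1) := by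
      have := List.sum_le_card_nsmul (L.map (fun n => pvPot V (PySem.Set.add u2 n)))
        ((V.length + 1) ^ (pvFree V u2 - 1)) hbound
      simpa [List.length_map, smul_eq_mul] using this
    have hLlen : L.length ≤ V.length := by
      have hnodup : L.Nodup := by
        rw [hL]
        exact List.Nodup.filter _ (((PySem.List.sorted_perm nbrs (fun x => x) false)).nodup_iff.mpr (h.2 curr).1)
      have hsub : L ⊆ V := fun x hx => (hLmem x hx).1
      calc L.length = L.toFinset.card := (List.toFinset_card_of_nodup hnodup).symm
        _ ≤ V.toFinset.card := Finset.card_le_card (by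
              intro x hx; simp only [List.mem_toFinset] at *; exact hsub hx)
        _ ≤ V.length := V.toFinset_card_le
    calc (L.map (fun n => pvPot V (PySem.Set.add u2 n))).sum
        ≤ L.length * (V.length + 1) ^ (pvFree V u2 - 1) := hsum_le
      _ ≤ V.length * (V.length + 1) ^ (pvFree V u2 - 1) := Nat.mul_le_mul_right _ hLlen
      _ < (V.length + 1) * (V.length + 1) ^ (pvFree V u2 - 1) := by
          exact (Nat.mul_lt_mul_right (Nat.pow_pos (Nat.succ_pos _))).mpr (Nat.lt_succ_self _)
      _ = (V.length + 1) ^ (pvFree V u2 - 1 + 1) := by ring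
      _ = pvPot V u2 := by unfold pvPot; congr 1; omega

theorem pvBuildAdj_ok_aux (V : List Int) :
    ∀ (es : List (Int × Int)) (adj : PySem.Dict Int (PySem.Set Int)),
    (∀ uv ∈ es, uv.1 ∈ V ∧ uv.2 ∈ V) →
    (∀ k : Int, (PySem.Dict.getD adj k PySem.Set.empty).Nodup ∧
      (∀ x ∈ PySem.Dict.getD adj k PySem.Set.empty, x ∈ V) ∧
      (k ∉ V → PySem.Dict.getD adj k PySem.Set.empty = [])) →
    ∀ k : Int,
      (PySem.Dict.getD (es.foldl (fun adj uv =>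
        let adj1 := adj.insert uv.1 (PySem.Set.add (adj.getD uv.1 PySem.Set.empty) uv.2)
        adj1.insert uv.2 (PySem.Set.add (adj1.getD uv.2 PySem.Set.empty) uv.1)) adj) k PySem.Set.empty).Nodup ∧
      (∀ x ∈ PySem.Dict.getD (es.foldl (fun adj uv =>
        let adj1 := adj.insert uv.1 (PySem.Set.add (adj.getD uv.1 PySem.Set.empty) uv.2)
        adj1.insert uv.2 (PySem.Set.add (adj1.getD uv.2 PySem.Set.empty) uv.1)) adj) k PySem.Set.empty, x ∈ V) ∧
      (k ∉ V → PySem.Dict.getD (es.foldl (fun adj uv =>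
        let adj1 := adj.insert uv.1 (PySem.Set.add (adj.getD uv.1 PySem.Set.empty) uv.2)
        adj1.insert uv.2 (PySem.Set.add (adj1.getD uv.2 PySem.Set.empty) uv.1)) adj) k PySem.Set.empty = []) := by
  intro es
  induction es with
  | nil => intro adj _ hadj k; exact hadj k
  | cons uv es ih =>
    intro adj hes hadj k
    simp only [List.foldl_cons]
    apply ih
    · intro p hp; exact hes p (List.mem_cons_of_mem _ hp)
    · have huv := hes uv List.mem_cons_self
      intro j
      simp only [PySem.Dict.getD_insert]
      rcases hadj j with ⟨hnd, hmem, hnotin⟩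
      by_cases hj2 : j = uv.2
      · subst hj2
        simp only [reduceIte]
        by_cases hj1 : uv.2 = uv.1
        · rw [if_pos hj1]
          rcases hadj uv.1 with ⟨hnd1, hmem1, _⟩
          refine ⟨PySem.Set.nodup_add _ _ (PySem.Set.nodup_add _ _ hnd1), fun x hx => ?_,
            fun hk => absurd huv.2 hk⟩
          rw [PySem.Set.mem_add] at hx
          rcases hx with hx | rfl
          · rw [PySem.Set.mem_add] at hx
            rcases hx with hx | rfl
            · exact hmem1 x hx
            · exact huv.2
          · exact huv.1
        · rw [if_neg hj1]
          refine ⟨PySem.Set.nodup_add _ _ hnd, fun x hx => ?_, fun hk => absurd huv.2 hk⟩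
          rw [PySem.Set.mem_add] at hx
          rcases hx with hx | rfl
          · exact hmem x hx
          · exact huv.1
      · rw [if_neg hj2]
        by_cases hj1 : j = uv.1
        · subst hj1
          simp only [reduceIte]
          refine ⟨PySem.Set.nodup_add _ _ hnd, fun x hx => ?_, fun hk => absurd huv.1 hk⟩
          rw [PySem.Set.mem_add] at hx
          rcases hx with hx | rfl
          · exact hmem x hx
          · exact huv.2
        · rw [if_neg hj1]
          exact ⟨hnd, hmem, hnotin⟩

theorem pvBuildAdj_ok (edges : List (Int × Int)) : pvAdjOK (pvBuildAdj edges) (pvVerts edges) := by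
  refine ⟨PySem.Set.nodup_ofList _, ?_⟩
  apply pvBuildAdj_ok_aux
  · intro uv huv
    constructor <;> (rw [pvVerts, PySem.Set.mem_ofList, List.mem_flatMap]; exact ⟨uv, huv, by simp⟩)
  · intro k
    refine ⟨?_, ?_, ?_⟩ <;> simp [PySem.Dict.getD_empty, PySem.Set.empty]

-- ===== PORT A =====
-- find_paths / the explicit-stack while-loop of A, transliterated.  The Python indexes
-- terminal_pairs by pair_idx; the port recurses on the remaining suffix, the same traversal.
-- The Python list's stack top is its END; the port keeps the top at the HEAD, so one round of
-- pushes prepends the pushed entries reversed.  adj/V/h are loop-invariant context arguments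
-- (h is a Prop used only by the termination proof).
mutual
def pvFindA (adj : PySem.Dict Int (PySem.Set Int)) (V : List Int) (h : pvAdjOK adj V)
    (pairs : List (Int × Int)) (used : PySem.Set Int) : Option (List (List Int)) :=
  match pairs with
  | [] => some []
  | (s, t) :: rest =>
    if used.contains s || used.contains t then none
    else pvLoopA adj V h rest t [(s, [s], PySem.Set.add used s)]
termination_by (pairs.length, 0)

def pvLoopA (adj : PySem.Dict Int (PySem.Set Int)) (V : List Int) (h : pvAdjOK adj V)
    (rest : List (Int × Int)) (t : Int)
    (stack : List (Int × List Int × PySem.Set Int)) : Option (List (List Int)) :=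
  match stack with
  | [] => none
  | (curr, path, u2) :: stk =>
    if curr = t then
      match pvFindA adj V h rest u2 with
      | some r => some (path :: r)
      | none => pvLoopA adj V h rest t stk
    else
      pvLoopA adj V h rest t
        ((((PySem.List.sorted (PySem.Dict.getD adj curr PySem.Set.empty) (fun x => x) false).filter
            (fun n => !(u2.contains n))).map
            (fun n => (n, path ++ [n], PySem.Set.add u2 n))).reverse ++ stk)
termination_by (rest.length, pvStackPot V stack)
decreasing_by
  · apply Prod.Lex.right
    simp only [pvStackPot_cons]
    have := pvPot_pos V u2
    omega
  · apply Prod.Lex.right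
    simp only [pvStackPot_cons]
    have := pvPot_pos V u2
    omega
  · apply Prod.Lex.right
    simp only [pvStackPot_cons, pvStackPot_append]
    have := pvPushPot_lt adj V h curr path u2
    omega
end

def solve_dcp_brute (num_vertices : Int) (edges : List (Int × Int)) (terminal_pairs : List (Int × Int)) : Option (List (List Int)) :=
  pvFindA (pvBuildAdj edges) (pvVerts edges) (pvBuildAdj_ok edges) terminal_pairs PySem.Set.empty

-- ===== PORT B =====
-- the recursive backtracker of Source B: solve / dfs / the for-loop over sorted(adj[curr], reverse=True)
mutual
def pvSolveB (adj : PySem.Dict Int (PySem.Set Int)) (V : List Int) (h : pvAdjOK adj V)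
    (pairs : List (Int × Int)) (used : PySem.Set Int) : Option (List (List Int)) :=
  match pairs with
  | [] => some []
  | (s, t) :: rest =>
    if used.contains s || used.contains t then none
    else pvDfsB adj V h rest t s [s] (PySem.Set.add used s)
termination_by (pairs.length, V.length + 2, 0, 0)
decreasing_by
  · simp only [List.length_cons]
    apply Prod.Lex.right
    apply Prod.Lex.left
    have := pvFree_le V (PySem.Set.add used s)
    omega

def pvDfsB (adj : PySem.Dict Int (PySem.Set Int)) (V : List Int) (h : pvAdjOK adj V)
    (rest : List (Int × Int)) (t : Int)
    (curr : Int) (path : List Int) (blocked : PySem.Set Int) : Option (List (List Int)) :=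
  if curr = t then
    (pvSolveB adj V h rest blocked).map (fun r => path :: r)
  else
    pvGoB adj V h rest t path blocked
      (PySem.List.sorted (PySem.Dict.getD adj curr PySem.Set.empty) (fun x => x) true)
termination_by (rest.length + 1, pvFree V blocked + 1,
  (PySem.Dict.getD adj curr PySem.Set.empty).length, 1)
decreasing_by
  · apply Prod.Lex.left
    omega
  · rw [PySem.List.length_sorted]
    apply Prod.Lex.right
    apply Prod.Lex.right
    apply Prod.Lex.right
    omega

def pvGoB (adj : PySem.Dict Int (PySem.Set Int)) (V : List Int) (h : pvAdjOK adj V)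
    (rest : List (Int × Int)) (t : Int) (path : List Int) (blocked : PySem.Set Int)
    (ns : List Int) : Option (List (List Int)) :=
  match ns with
  | [] => none
  | n :: ns' =>
    if blocked.contains n then pvGoB adj V h rest t path blocked ns'
    else
      match pvDfsB adj V h rest t n (path ++ [n]) (PySem.Set.add blocked n) with
      | some r => some r
      | none => pvGoB adj V h rest t path blocked ns'
termination_by (rest.length + 1, pvFree V blocked + 1, ns.length, 0)
decreasing_by
  · apply Prod.Lex.right
    apply Prod.Lex.right
    apply Prod.Lex.left
    simp
  · by_cases hn : n ∈ V
    · apply Prod.Lex.right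
      apply Prod.Lex.left
      have := pvFree_add_lt V blocked n hn (by simpa using ‹¬blocked.contains n = true›)
      omega
    · rw [pvFree_add_of_not_mem V blocked n hn, (h.2 n).2.2 hn]
      apply Prod.Lex.right
      apply Prod.Lex.right
      apply Prod.Lex.left
      simp
  · apply Prod.Lex.right
    apply Prod.Lex.right
    apply Prod.Lex.left
    simp
end

def solve_dcp_brute_alt (num_vertices : Int) (edges : List (Int × Int)) (terminal_pairs : List (Int × Int)) : Option (List (List Int)) :=
  pvSolveB (pvBuildAdj edges) (pvVerts edges) (pvBuildAdj_ok edges) terminal_pairs PySem.Set.empty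

-- ===== PRECONDITION & SPEC =====
def Spec_solve_dcp_brute (num_vertices : Int) (edges : List (Int × Int)) (terminal_pairs : List (Int × Int)) (out : Option (List (List Int))) : Prop := out = solve_dcp_brute_alt num_vertices edges terminal_pairs
instance (num_vertices : Int) (edges : List (Int × Int)) (terminal_pairs : List (Int × Int)) (out : Option (List (List Int))) : Decidable (Spec_solve_dcp_brute num_vertices edges terminal_pairs out) := by unfold Spec_solve_dcp_brute; infer_instance

-- ===== CLAIM (what is proved, stated in full; the proofs are below) =====
def Claim_equal_solve_dcp_brute : Prop := ∀ (num_vertices : Int) (edges : List (Int × Int)) (terminal_pairs : List (Int × Int)), Dom_solve_dcp_brute num_vertices edges terminal_pairs → Spec_solve_dcp_brute num_vertices edges terminal_pairs (solve_dcp_brute num_vertices edges terminal_pairs)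

-- ===== LEMMAS AND PROOFS =====
-- pvFirst os = the first non-None element of os (None if all are None); pvLoopA on a stack is
-- pvFirst of pvDfsB over the stack entries, proved by strong induction on the stack potential.
def pvFirst : List (Option (List (List Int))) → Option (List (List Int))
  | [] => none
  | o :: os => match o with | some r => some r | none => pvFirst os

theorem pvFirst_append (xs ys : List (Option (List (List Int)))) :
    pvFirst (xs ++ ys) = match pvFirst xs with | some r => some r | none => pvFirst ys := by
  induction xs with
  | nil => simp [pvFirst]
  | cons o os ih =>
    cases o with
    | some r => simp [pvFirst]
    | none => simpa [pvFirst] using ih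

theorem pvSortedTrue (l : List Int) (hl : l.Nodup) :
    PySem.List.sorted l (fun x => x) true = (PySem.List.sorted l (fun x => x) false).reverse := by
  apply PySem.List.sorted_rev_eq_of_perm_of_pairwise_gt
  · exact (List.reverse_perm _).trans (PySem.List.sorted_perm l (fun x => x) false)
  · rw [List.pairwise_reverse]
    have hle : (PySem.List.sorted l (fun x => x) false).Pairwise (fun a b => a ≤ b) :=
      PySem.List.sorted_pairwise l (fun x => x)
    have hnd : (PySem.List.sorted l (fun x => x) false).Nodup :=
      ((PySem.List.sorted_perm l (fun x => x) false).nodup_iff).mpr hl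
    have := List.Pairwise.and hle hnd
    exact this.imp (fun h => lt_of_le_of_ne h.1 h.2)

theorem pvGoB_eq (adj : PySem.Dict Int (PySem.Set Int)) (V : List Int) (h : pvAdjOK adj V)
    (rest : List (Int × Int)) (t : Int) (path : List Int) (blocked : PySem.Set Int)
    (ns : List Int) :
    pvGoB adj V h rest t path blocked ns
      = pvFirst ((ns.filter (fun n => !(blocked.contains n))).map
          (fun n => pvDfsB adj V h rest t n (path ++ [n]) (PySem.Set.add blocked n))) := by
  induction ns with
  | nil => simp [pvGoB, pvFirst]
  | cons n ns' ih =>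
    rw [pvGoB]
    by_cases hb : blocked.contains n = true
    · rw [if_pos hb, List.filter_cons_of_neg (by rw [hb]; simp), ih]
    · rw [if_neg hb, List.filter_cons_of_pos (by simp only [Bool.not_eq_true] at hb; rw [hb]; rfl),
        List.map_cons, ih]
      cases hd : pvDfsB adj V h rest t n (path ++ [n]) (PySem.Set.add blocked n) with
      | some r => simp [pvFirst]
      | none => simp [pvFirst]

theorem pvAux (adj : PySem.Dict Int (PySem.Set Int)) (V : List Int) (h : pvAdjOK adj V)
    (rest : List (Int × Int)) (t : Int)
    (hMain : ∀ used, pvFindA adj V h rest used = pvSolveB adj V h rest used) :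
    ∀ (k : Nat) (stack : List (Int × List Int × PySem.Set Int)), pvStackPot V stack ≤ k →
      pvLoopA adj V h rest t stack
        = pvFirst (stack.map (fun e => pvDfsB adj V h rest t e.1 e.2.1 e.2.2)) := by
  intro k
  induction k using Nat.strong_induction_on with
  | _ k ih =>
    intro stack hpot
    match stack with
    | [] => simp [pvLoopA, pvFirst]
    | (curr, path, u2) :: stk =>
      have hpos := pvPot_pos V u2
      have hcons : pvStackPot V ((curr, path, u2) :: stk) = pvPot V u2 + pvStackPot V stk := by
        simp [pvStackPot_cons]
      rw [pvLoopA]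
      by_cases hct : curr = t
      · rw [if_pos hct]
        simp only [List.map_cons]
        have hdfs : pvDfsB adj V h rest t curr path u2
            = (pvFindA adj V h rest u2).map (fun r => path :: r) := by
          rw [pvDfsB, if_pos hct, hMain u2]
        cases hf : pvFindA adj V h rest u2 with
        | some r => simp [pvFirst, hdfs, hf]
        | none =>
          have hlt : pvStackPot V stk ≤ k - 1 := by omega
          rw [ih (k - 1) (by omega) stk hlt]
          simp [pvFirst, hdfs, hf]
      · rw [if_neg hct]
        have hpush := pvPushPot_lt adj V h curr path u2
        have hnew : pvStackPot V
            ((((PySem.List.sorted (PySem.Dict.getD adj curr PySem.Set.empty) (fun x => x) false).filter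
              (fun n => !(u2.contains n))).map
              (fun n => (n, path ++ [n], PySem.Set.add u2 n))).reverse ++ stk) ≤ k - 1 := by
          rw [pvStackPot_append]
          omega
        rw [ih (k - 1) (by omega) _ hnew, List.map_append, pvFirst_append, List.map_cons]
        have hdfs : pvDfsB adj V h rest t curr path u2
            = pvGoB adj V h rest t path u2
                (PySem.List.sorted (PySem.Dict.getD adj curr PySem.Set.empty) (fun x => x) true) := by
          rw [pvDfsB, if_neg hct]
        simp only [pvFirst]
        rw [hdfs, pvGoB_eq]
        have hrevmap :
            ((((PySem.List.sorted (PySem.Dict.getD adj curr PySem.Set.empty) (fun x => x) false).filter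
              (fun n => !(u2.contains n))).map
              (fun n => (n, path ++ [n], PySem.Set.add u2 n))).reverse).map
                (fun e => pvDfsB adj V h rest t e.1 e.2.1 e.2.2)
            = ((PySem.List.sorted (PySem.Dict.getD adj curr PySem.Set.empty) (fun x => x) true).filter
                (fun n => !(u2.contains n))).map
                (fun n => pvDfsB adj V h rest t n (path ++ [n]) (PySem.Set.add u2 n)) := by
          rw [pvSortedTrue _ (h.2 curr).1]
          simp [List.filter_reverse, List.map_reverse, List.map_map, Function.comp]
        rw [hrevmap]

theorem pvMain (adj : PySem.Dict Int (PySem.Set Int)) (V : List Int) (h : pvAdjOK adj V) :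
    ∀ (pairs : List (Int × Int)) (used : PySem.Set Int),
      pvFindA adj V h pairs used = pvSolveB adj V h pairs used := by
  intro pairs
  induction pairs with
  | nil => intro used; rw [pvFindA, pvSolveB]
  | cons p rest ih =>
    intro used
    obtain ⟨s, t⟩ := p
    rw [pvFindA, pvSolveB]
    by_cases hg : (used.contains s || used.contains t) = true
    · rw [if_pos hg, if_pos hg]
    · rw [if_neg hg, if_neg hg,
        pvAux adj V h rest t ih (pvStackPot V [(s, [s], PySem.Set.add used s)]) _ (le_refl _),
        List.map_cons, List.map_nil]
      simp only [pvFirst]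
      cases pvDfsB adj V h rest t s [s] (PySem.Set.add used s) <;> rfl

-- ===== VERDICT (by name: the statement is the Claim_ definition above) =====
theorem solve_dcp_brute_spec : Claim_equal_solve_dcp_brute := by
  intro num_vertices edges terminal_pairs _
  unfold Spec_solve_dcp_brute solve_dcp_brute solve_dcp_brute_alt
  exact pvMain _ _ (pvBuildAdj_ok edges) terminal_pairs PySem.Set.empty
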